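-- pv_equiv track=rewrite | github.com/Malith-nethsiri/valuerpro-project | backend/app/api/api_v1/endpoints/batch_ocr.py | calculate_area_consistency
-- ===== SOURCE A (Python) =====
-- from typing import List, Dict, Any, Optional
--
-- def calculate_area_consistency(areas: List[str]) -> Optional[bool]:
--     """Check if land areas from different documents are consistent"""
--     if not areas:
--         return None
--
--     # Normalize area representations and check for consistency
--     normalized_areas = []
--     for area in areas:
--         # Simple normalization - can be enhanced
--         normalized = area.lower().replace(',', '').replace(' ', '')
--         normalized_areas.append(normalized)
--
--     return len(set(normalized_areas)) <= 1
-- ===== SOURCE B (Python) =====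
-- from typing import List, Optional
--
-- def calculate_area_consistency(areas: List[str]) -> Optional[bool]:
--     """Check if land areas from different documents are consistent"""
--     if not areas:
--         return None
--     xs = sorted(area.lower().replace(',', '').replace(' ', '') for area in areas)
--     return xs[0] == xs[-1]
-- ===== Notes on version B (the rewrite author's own statement) =====
-- stated objective: alternative
-- what changed: Replaces A's build-list-then-set-deduplicate-and-count pass by sorting the normalized strings and comparing the extremes: in a sorted list the first and last elements are equal iff all elements are equal, so no hash set is ever built.
import Mathlib
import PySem

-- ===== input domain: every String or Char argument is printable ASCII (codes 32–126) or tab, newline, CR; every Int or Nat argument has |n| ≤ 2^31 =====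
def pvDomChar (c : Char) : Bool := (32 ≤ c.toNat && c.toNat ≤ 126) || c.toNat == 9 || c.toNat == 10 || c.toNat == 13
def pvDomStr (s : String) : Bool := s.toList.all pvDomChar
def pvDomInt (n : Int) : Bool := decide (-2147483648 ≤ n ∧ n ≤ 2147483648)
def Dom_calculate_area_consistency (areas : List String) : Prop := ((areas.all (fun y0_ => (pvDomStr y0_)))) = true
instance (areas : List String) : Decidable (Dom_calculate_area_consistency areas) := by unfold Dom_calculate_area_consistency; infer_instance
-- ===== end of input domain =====

-- B sorts the normalized strings and compares first with last (equal extremes of a sorted list iff all equal), instead of A's set-deduplicate-and-count; alternative algorithm, not claimed faster.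


-- ===== PORT A =====
-- area.lower().replace(',', '').replace(' ', '') — shared by both ports (identical expression in both Pythons)
def pvNorm (area : String) : String :=
  PySem.Str.replace (PySem.Str.replace (PySem.Str.lower area) "," "") " " ""

def calculate_area_consistency (areas : List String) : Option Bool :=
  if areas = [] then none
  else
    let normalized_areas := areas.foldl (fun acc area => acc ++ [pvNorm area]) []
    some (decide ((PySem.Set.ofList normalized_areas).length ≤ 1))

-- ===== PORT B =====
-- reuses pvNorm: B's normalization expression is textually the same as A's
def calculate_area_consistency_alt (areas : List String) : Option Bool :=
  if areas = [] then none
  else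
    let xs := PySem.List.sorted (areas.map pvNorm) (fun x => x) false
    some (PySem.List.pyGet? xs 0 == PySem.List.pyGet? xs (-1))

-- ===== PRECONDITION & SPEC =====
def Spec_calculate_area_consistency (areas : List String) (out : Option Bool) : Prop := out = calculate_area_consistency_alt areas
instance (areas : List String) (out : Option Bool) : Decidable (Spec_calculate_area_consistency areas out) := by unfold Spec_calculate_area_consistency; infer_instance

-- ===== CLAIM =====
def Claim_equal_calculate_area_consistency : Prop := ∀ (areas : List String), Dom_calculate_area_consistency areas → Spec_calculate_area_consistency areas (calculate_area_consistency areas)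

-- ===== LEMMAS AND PROOFS =====

theorem pv_set_card_le_one_iff (l : List String) (hl : l ≠ []) :
    ((PySem.Set.ofList l).length ≤ 1) ↔ ∀ a ∈ l, ∀ b ∈ l, a = b := by
  cases l with
  | nil => exact absurd rfl hl
  | cons r t =>
    rw [PySem.Set.ofList_cons]
    constructor
    · intro h a ha b hb
      have hzero : ∀ y ∈ t, y = r := by
        intro y hy
        by_contra hne
        have hmem : y ∈ PySem.Set.discard (PySem.Set.ofList t) r := by
          rw [PySem.Set.mem_discard, PySem.Set.mem_ofList]; exact ⟨hy, hne⟩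
        have := List.length_pos_of_mem hmem
        simp only [List.length_cons] at h
        omega
      rcases List.mem_cons.1 ha with rfl | ha' <;> rcases List.mem_cons.1 hb with rfl | hb'
      · rfl
      · exact (hzero b hb').symm
      · exact hzero a ha'
      · exact (hzero a ha').trans (hzero b hb').symm
    · intro h
      have : PySem.Set.discard (PySem.Set.ofList t) r = [] := by
        rw [List.eq_nil_iff_forall_not_mem]
        intro y hy
        rw [PySem.Set.mem_discard, PySem.Set.mem_ofList] at hy
        exact hy.2 (h y (List.mem_cons_of_mem _ hy.1) r (List.mem_cons_self))
      simp [this]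

theorem pv_sorted_ends_iff (l : List String) (hl : l ≠ []) :
    (PySem.List.pyGet? (PySem.List.sorted l (fun x => x) false) 0 =
     PySem.List.pyGet? (PySem.List.sorted l (fun x => x) false) (-1)) ↔ ∀ a ∈ l, ∀ b ∈ l, a = b := by
  set ys := PySem.List.sorted l (fun x => x) false with hys
  have hperm : ys.Perm l := PySem.List.sorted_perm l _ _
  have hne : ys ≠ [] := by
    rw [hys, Ne, PySem.List.sorted_eq_nil_iff]; exact hl
  have hlen : 0 < ys.length := List.length_pos_iff.2 hne
  rw [PySem.List.pyGet?_zero, PySem.List.pyGet?_neg_one,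
    List.getElem?_eq_getElem hlen, List.getLast?_eq_getElem? ,
    List.getElem?_eq_getElem (by omega : ys.length - 1 < ys.length), Option.some_inj]
  constructor
  · intro h a ha b hb
    have hmono : ∀ i (hi : i < ys.length), ys[i] = ys[0] := by
      intro i hi
      have h1 : ys[0] ≤ ys[i] := PySem.List.sorted_id_getElem_mono l (Nat.zero_le i) (hys ▸ hi)
      have h2 : ys[i] ≤ ys[ys.length - 1] := PySem.List.sorted_id_getElem_mono l (by omega) (hys ▸ (by omega : ys.length - 1 < ys.length))
      exact le_antisymm (h ▸ h2) h1
    obtain ⟨i, hi, rfl⟩ := List.mem_iff_getElem.1 (hperm.mem_iff.2 ha)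
    obtain ⟨j, hj, rfl⟩ := List.mem_iff_getElem.1 (hperm.mem_iff.2 hb)
    rw [hmono i hi, hmono j hj]
  · intro h
    exact h _ (hperm.subset (List.getElem_mem hlen)) _ (hperm.subset (List.getElem_mem _))

-- ===== VERDICT =====
theorem calculate_area_consistency_spec : Claim_equal_calculate_area_consistency := by
  intro areas _
  unfold Spec_calculate_area_consistency calculate_area_consistency calculate_area_consistency_alt
  by_cases h : areas = []
  · simp [h]
  · simp only [if_neg h]
    rw [PySem.List.foldl_append_singleton_eq_map, List.nil_append]
    have hne : areas.map pvNorm ≠ [] := by simpa using h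
    have := pv_set_card_le_one_iff (areas.map pvNorm) hne
    have h2 := pv_sorted_ends_iff (areas.map pvNorm) hne
    congr 1
    rw [Bool.eq_iff_iff, decide_eq_true_iff, beq_iff_eq, this, h2]
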